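-- pv_equiv track=rewrite | github.com/DiegoArcelli/BlocksWorld | blocks_world.py | get_movable
-- ===== SOURCE A (Python) =====
-- def get_movable(state):
--     blocks = [*state[0:-1]]
--     size = state[-1]
--     columns = {}
--     tops = []
--     for block in blocks:
--         n, i, j = block
--         if j not in columns:
--             columns[j] = (n, i, j)
--         else:
--             if i > columns[j][1]:
--                 columns[j] = (n, i, j)
--     for col in columns:
--         tops.append(columns[col])
--     return tops
-- ===== SOURCE B (Python) =====
-- def get_movable(state):
--     blocks = state[:-1]
--     columns = {}
--     for n, i, j in blocks:
--         columns[j] = columns.get(j, []) + [(n, i, j)]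
--     return [max(bs, key=lambda b: b[1]) for bs in columns.values()]
-- ===== Notes on version B (the rewrite author's own statement) =====
-- stated objective: alternative
-- what changed: B groups blocks into per-column lists in first-seen order and then selects each column's top with max(key=row) in a separate reduction, instead of A's single running-best dict update plus a key-iteration lookup pass.
import Mathlib
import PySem

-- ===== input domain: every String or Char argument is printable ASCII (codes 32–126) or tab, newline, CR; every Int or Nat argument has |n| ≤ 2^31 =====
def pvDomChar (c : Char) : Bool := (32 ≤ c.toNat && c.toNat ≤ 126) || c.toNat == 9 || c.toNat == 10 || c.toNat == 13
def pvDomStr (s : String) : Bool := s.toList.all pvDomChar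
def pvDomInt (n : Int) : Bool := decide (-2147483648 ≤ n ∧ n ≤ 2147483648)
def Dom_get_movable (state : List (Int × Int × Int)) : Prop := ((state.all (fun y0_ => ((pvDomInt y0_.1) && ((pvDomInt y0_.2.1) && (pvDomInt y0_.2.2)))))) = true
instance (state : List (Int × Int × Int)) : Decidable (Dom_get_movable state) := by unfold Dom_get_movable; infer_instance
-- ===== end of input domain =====

-- B groups blocks into per-column lists (first-seen column order) and picks each column's top
-- with a separate max-by-row reduction, instead of A's running-best update; same cost class.

-- ===== PORT A =====
def get_movable (state : List (Int × Int × Int)) : List (Int × Int × Int) :=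
  let blocks := PySem.List.slice state (some 0) (some (-1))
  -- size = state[-1] raises IndexError on the empty list (excluded by Pre_); size is never used afterwards
  let columns : PySem.Dict Int (Int × Int × Int) :=
    blocks.foldl (fun columns block =>
      if columns.contains block.2.2 = false then
        columns.insert block.2.2 block
      else if block.2.1 > (columns.getD block.2.2 (0, 0, 0)).2.1 then
        -- columns[j][1]: the key is present in this branch, so getD's default is never read
        columns.insert block.2.2 block
      else columns) PySem.Dict.empty
  columns.keys.foldl (fun tops col => tops ++ [columns.getD col (0, 0, 0)]) []

-- ===== PORT B =====
def get_movable_alt (state : List (Int × Int × Int)) : List (Int × Int × Int) :=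
  let blocks := PySem.List.slice state none (some (-1))
  let columns : PySem.Dict Int (List (Int × Int × Int)) :=
    blocks.foldl (fun columns b =>
      columns.insert b.2.2 (columns.getD b.2.2 [] ++ [b])) PySem.Dict.empty
  -- max(bs, key=lambda b: b[1]): every stored list is nonempty, so the default is never read
  columns.values.map (fun bs => (PySem.List.max? bs (fun b => b.2.1)).getD (0, 0, 0))

-- ===== PRECONDITION & SPEC =====
-- Pre_ excludes only the empty list, on which A's 'state[-1]' raises IndexError.
def Pre_get_movable (state : List (Int × Int × Int)) : Prop := state ≠ []
instance (state : List (Int × Int × Int)) : Decidable (Pre_get_movable state) := by unfold Pre_get_movable; infer_instance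
def pvWitness_get_movable : (List (Int × Int × Int)) := [(1, 0, 0), (2, 1, 0)]

def Spec_get_movable (state : List (Int × Int × Int)) (out : List (Int × Int × Int)) : Prop := out = get_movable_alt state
instance (state : List (Int × Int × Int)) (out : List (Int × Int × Int)) : Decidable (Spec_get_movable state out) := by unfold Spec_get_movable; infer_instance

-- ===== CLAIM (what is proved, stated in full; the proofs are below) =====
def Claim_equal_get_movable : Prop := ∀ (state : List (Int × Int × Int)), Dom_get_movable state → Pre_get_movable state → Spec_get_movable state (get_movable state)

-- ===== LEMMAS AND PROOFS =====

-- the value A keeps for a column is the first max-by-row of the list B keeps for it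
def pvTop (l : List (Int × Int × Int)) : Int × Int × Int :=
  (PySem.List.max? l (fun b => b.2.1)).getD (0, 0, 0)

def pvF (p : Int × List (Int × Int × Int)) : Int × (Int × Int × Int) := (p.1, pvTop p.2)

def pvStepA (d : PySem.Dict Int (Int × Int × Int)) (block : Int × Int × Int) :
    PySem.Dict Int (Int × Int × Int) :=
  if d.contains block.2.2 = false then d.insert block.2.2 block
  else if block.2.1 > (d.getD block.2.2 (0, 0, 0)).2.1 then d.insert block.2.2 block
  else d

def pvStepB (d : PySem.Dict Int (List (Int × Int × Int))) (b : Int × Int × Int) :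
    PySem.Dict Int (List (Int × Int × Int)) :=
  d.insert b.2.2 (d.getD b.2.2 [] ++ [b])

lemma pvTop_append (l : List (Int × Int × Int)) (b : Int × Int × Int) (h : l ≠ []) :
    pvTop (l ++ [b]) = if (pvTop l).2.1 < b.2.1 then b else pvTop l := by
  obtain ⟨m, hm⟩ : ∃ m, PySem.List.max? l (fun b => b.2.1) = some m := by
    cases hml : PySem.List.max? l (fun b => b.2.1) with
    | none => exact absurd ((PySem.List.max?_eq_none_iff _ _).mp hml) h
    | some m => exact ⟨m, rfl⟩
  simp only [pvTop, PySem.List.max?, List.foldl_append] at *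
  rw [hm]
  simp only [List.foldl_cons, List.foldl_nil]
  split <;> rename_i hc
  all_goals simp_all

lemma pvGet?_map_items (its : List (Int × List (Int × Int × Int))) (j : Int) :
    (PySem.Dict.mk (its.map pvF)).get? j
      = ((PySem.Dict.mk its).get? j).map pvTop := by
  induction its with
  | nil => simp [PySem.Dict.get?]
  | cons p rest ih =>
    cases p with
    | mk k v =>
      by_cases hk : k = j
      · simp [pvF, PySem.Dict.get?_mk_cons, hk]
      · simpa [pvF, PySem.Dict.get?_mk_cons, hk] using ih

lemma pvGet?_of_rel (dA : PySem.Dict Int (Int × Int × Int))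
    (dB : PySem.Dict Int (List (Int × Int × Int)))
    (h1 : dA.items = dB.items.map pvF) (j : Int) :
    dA.get? j = (dB.get? j).map pvTop := by
  have : dA = PySem.Dict.mk (dB.items.map pvF) := by
    apply PySem.Dict.ext; exact h1
  rw [this, pvGet?_map_items]

lemma pvContains_of_rel (dA : PySem.Dict Int (Int × Int × Int))
    (dB : PySem.Dict Int (List (Int × Int × Int)))
    (h1 : dA.items = dB.items.map pvF) (j : Int) :
    dA.contains j = dB.contains j := by
  rw [PySem.Dict.contains_eq_isSome_get?, PySem.Dict.contains_eq_isSome_get?,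
    pvGet?_of_rel dA dB h1 j]
  cases dB.get? j <;> rfl

-- one loop step preserves the simulation between A's dict and B's dict
lemma pvStep_rel (b : Int × Int × Int) (dA : PySem.Dict Int (Int × Int × Int))
    (dB : PySem.Dict Int (List (Int × Int × Int)))
    (h1 : dA.items = dB.items.map pvF) (h2 : dB.keys.Nodup)
    (h3 : ∀ p ∈ dB.items, p.2 ≠ []) :
    (pvStepA dA b).items = (pvStepB dB b).items.map pvF
      ∧ (pvStepB dB b).keys.Nodup
      ∧ ∀ p ∈ (pvStepB dB b).items, p.2 ≠ [] := by
  cases hc : dB.contains b.2.2 with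
  | false =>
    have hcA : dA.contains b.2.2 = false := by
      rw [pvContains_of_rel dA dB h1]; exact hc
    have hDB : dB.getD b.2.2 [] = [] := PySem.Dict.getD_of_not_contains dB [] hc
    have hjk : b.2.2 ∉ dB.keys := by
      intro hmem
      rw [(PySem.Dict.contains_iff_mem_keys dB b.2.2).mpr hmem] at hc
      simp at hc
    refine ⟨?_, ?_, ?_⟩
    · simp only [pvStepA, pvStepB, hcA, hDB, if_true, List.nil_append]
      rw [PySem.Dict.items_insert_of_not_contains dA b hcA,
        PySem.Dict.items_insert_of_not_contains dB [b] hc]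
      simp [h1, pvF, pvTop, PySem.List.max?]
    · simp only [pvStepB, hDB, List.nil_append]
      rw [PySem.Dict.keys_insert_of_not_contains dB [b] hc]
      rw [List.nodup_append]
      refine ⟨h2, List.nodup_singleton _, ?_⟩
      intro a ha c hcm
      rw [List.mem_singleton] at hcm
      subst hcm
      exact fun h => hjk (h ▸ ha)
    · intro p hp
      simp only [pvStepB, hDB, List.nil_append] at hp
      rw [PySem.Dict.items_insert_of_not_contains dB [b] hc] at hp
      rcases List.mem_append.mp hp with h | h
      · exact h3 p h
      · simp at h; simp [h]
  | true =>
    obtain ⟨l', hl'⟩ : ∃ l', dB.get? b.2.2 = some l' := by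
      have := PySem.Dict.contains_eq_isSome_get? dB b.2.2
      rw [hc] at this
      cases hg : dB.get? b.2.2 with
      | none => rw [hg] at this; exact absurd this.symm (by simp)
      | some l' => exact ⟨l', rfl⟩
    have hne : l' ≠ [] := h3 (b.2.2, l') (PySem.Dict.mem_items_of_get?_eq_some dB hl')
    have hgA : dA.get? b.2.2 = some (pvTop l') := by
      rw [pvGet?_of_rel dA dB h1, hl']; rfl
    have hcA : dA.contains b.2.2 = true := by
      rw [pvContains_of_rel dA dB h1]; exact hc
    have hgDA : dA.getD b.2.2 (0, 0, 0) = pvTop l' := by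
      rw [PySem.Dict.getD_eq_get?_getD, hgA]; rfl
    have hgDB : dB.getD b.2.2 [] = l' := by
      rw [PySem.Dict.getD_eq_get?_getD, hl']; rfl
    have hval : ∀ p ∈ dB.items, p.1 = b.2.2 → p.2 = l' := by
      intro p hp hpj
      have := PySem.Dict.get?_of_mem_items dB (show (p.1, p.2) ∈ dB.items by simpa using hp) h2
      rw [hpj, hl'] at this
      exact (Option.some.injEq _ _).mp this.symm
    have hitemsB : (pvStepB dB b).items
        = dB.items.map (fun p => if (p.1 == b.2.2) = true then (b.2.2, l' ++ [b]) else p) := by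
      simp only [pvStepB, hgDB]
      exact PySem.Dict.items_insert_of_contains dB (l' ++ [b]) hc
    refine ⟨?_, ?_, ?_⟩
    · by_cases hgt : b.2.1 > (pvTop l').2.1
      · have hA : (pvStepA dA b).items
            = dA.items.map (fun p => if (p.1 == b.2.2) = true then (b.2.2, b) else p) := by
          simp only [pvStepA, hcA, hgDA, hgt, if_true]
          exact PySem.Dict.items_insert_of_contains dA b hcA
        rw [hA, hitemsB, h1, List.map_map, List.map_map]
        apply List.map_congr_left
        intro p hp
        by_cases hpj : p.1 = b.2.2
        · have hpl := hval p hp hpj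
          simp [Function.comp, pvF, hpj, hpl, pvTop_append l' b hne, if_pos hgt]
        · simp [Function.comp, pvF, hpj]
      · have hA : (pvStepA dA b).items = dA.items := by
          simp [pvStepA, hcA, hgDA, hgt]
        rw [hA, hitemsB, h1, List.map_map]
        apply List.map_congr_left
        intro p hp
        by_cases hpj : p.1 = b.2.2
        · have hpl := hval p hp hpj
          have : pvTop (l' ++ [b]) = pvTop l' := by
            rw [pvTop_append l' b hne, if_neg (by exact hgt)]
          simp [Function.comp, pvF, hpj, hpl, this]
        · simp [Function.comp, pvF, hpj]
    · have : (pvStepB dB b).keys = dB.keys := by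
        simp only [pvStepB, hgDB]
        exact PySem.Dict.keys_insert_of_contains dB (l' ++ [b]) hc
      rw [this]; exact h2
    · intro p hp
      rw [hitemsB] at hp
      obtain ⟨q, hq, hqe⟩ := List.mem_map.mp hp
      by_cases hqj : q.1 = b.2.2
      · simp [hqj] at hqe; simp [← hqe]
      · simp [hqj] at hqe; rw [← hqe]; exact h3 q hq

-- the loop invariant: A's dict is the image under pvF of B's dict, B's keys stay unique,
-- and B never stores an empty list
lemma pvLoop (l : List (Int × Int × Int)) (dA : PySem.Dict Int (Int × Int × Int))
    (dB : PySem.Dict Int (List (Int × Int × Int)))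
    (h1 : dA.items = dB.items.map pvF) (h2 : dB.keys.Nodup)
    (h3 : ∀ p ∈ dB.items, p.2 ≠ []) :
    (l.foldl pvStepA dA).items = (l.foldl pvStepB dB).items.map pvF
      ∧ (l.foldl pvStepB dB).keys.Nodup
      ∧ ∀ p ∈ (l.foldl pvStepB dB).items, p.2 ≠ [] := by
  induction l generalizing dA dB with
  | nil => exact ⟨h1, h2, h3⟩
  | cons b rest ih =>
    simp only [List.foldl_cons]
    obtain ⟨g1, g2, g3⟩ := pvStep_rel b dA dB h1 h2 h3
    exact ih _ _ g1 g2 g3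

-- the two ports build the related dicts from the same block list and read them off pointwise
theorem get_movable_spec : Claim_equal_get_movable := by
  intro state _ _
  unfold Spec_get_movable get_movable get_movable_alt
  simp only [PySem.List.slice_zero_start]
  obtain ⟨h1, h2, h3⟩ :=
    pvLoop (PySem.List.slice state none (some (-1))) PySem.Dict.empty PySem.Dict.empty
      (by rfl) (by simp [PySem.Dict.empty, PySem.Dict.keys]) (by simp [PySem.Dict.empty])
  set fA := (PySem.List.slice state none (some (-1))).foldl pvStepA PySem.Dict.empty with hfA
  set fB := (PySem.List.slice state none (some (-1))).foldl pvStepB PySem.Dict.empty with hfB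
  have hkeys : fA.keys = fB.keys := by
    show fA.items.map Prod.fst = fB.items.map Prod.fst
    rw [h1, List.map_map]
    rfl
  have hAnodup : fA.keys.Nodup := hkeys ▸ h2
  calc fA.keys.foldl (fun tops col => tops ++ [fA.getD col (0, 0, 0)]) []
      = fA.keys.map (fun col => fA.getD col (0, 0, 0)) := by
        rw [PySem.List.foldl_append_singleton_eq_map]; rfl
    _ = fA.values := (PySem.Dict.values_eq_map_keys fA hAnodup (0, 0, 0)).symm
    _ = fB.values.map (fun bs => (PySem.List.max? bs (fun b => b.2.1)).getD (0, 0, 0)) := by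
        show fA.items.map Prod.snd = (fB.items.map Prod.snd).map pvTop
        rw [h1, List.map_map, List.map_map]
        rfl
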